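-- pv_equiv track=rewrite | github.com/reddigari/TheRiddler | phone_drops.py | drop_floors
-- ===== SOURCE A (Python) =====
-- def drop_floors(floor, height=100):
--     floors = []
--     jump = floor
--     while floor < height and jump > 1:
--         floors.append(floor)
--         jump -= 1
--         floor += jump
--     return floors
-- ===== SOURCE B (Python) =====
-- def drop_floors(floor, height=100):
--     # Closed form: the k-th drop lands on k*floor - k*(k-1)//2, for k = 1..floor-1;
--     # keep these strictly increasing positions while they stay below height.
--     out = []
--     for k in range(1, floor):
--         p = k * floor - k * (k - 1) // 2
--         if p >= height:
--             break
--         out.append(p)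
--     return out
-- ===== Notes on version B (the rewrite author's own statement) =====
-- stated objective: alternative
-- what changed: Replaces the stateful while loop threading (floor, jump) with the closed-form position of the k-th drop (k*floor - k*(k-1)//2 for k = 1..floor-1) and a take-while truncation below height.
import Mathlib
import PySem

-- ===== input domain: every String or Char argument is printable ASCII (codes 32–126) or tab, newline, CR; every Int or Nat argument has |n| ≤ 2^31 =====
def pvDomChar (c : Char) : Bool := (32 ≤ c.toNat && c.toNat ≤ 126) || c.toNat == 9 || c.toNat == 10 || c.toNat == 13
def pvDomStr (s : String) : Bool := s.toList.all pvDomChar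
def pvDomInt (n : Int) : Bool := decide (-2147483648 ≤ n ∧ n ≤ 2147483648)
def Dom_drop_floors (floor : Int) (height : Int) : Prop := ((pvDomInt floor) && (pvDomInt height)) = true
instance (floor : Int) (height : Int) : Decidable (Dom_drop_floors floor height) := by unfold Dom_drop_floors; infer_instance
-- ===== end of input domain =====

-- B replaces A's stateful (floor, jump) while loop by the closed-form position of the
-- k-th drop and a take-while truncation; same cost ("alternative"), no speed claim.

-- ===== PORT A =====
-- the while loop: state (floor, jump), appends floor while floor < height and jump > 1
def dropA_loop (height floor jump : Int) : List Int :=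
  if h : floor < height ∧ 1 < jump then
    floor :: dropA_loop height (floor + (jump - 1)) (jump - 1)
  else []
termination_by jump.toNat
decreasing_by omega

def drop_floors (floor : Int) (height : Int) : List Int :=
  dropA_loop height floor floor

-- ===== PORT B =====
-- closed-form position of the k-th drop: k*floor - k*(k-1)//2
def posB (floor k : Int) : Int := k * floor - PySem.Int.floordiv (k * (k - 1)) 2

-- the `for k in range(1, floor): p = …; if p >= height: break; out.append(p)` loop
def cutB (floor height : Int) : List Int → List Int
  | [] => []
  | k :: rest =>
      let p := posB floor k
      if p ≥ height then [] else p :: cutB floor height rest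

def drop_floors_alt (floor : Int) (height : Int) : List Int :=
  cutB floor height (PySem.List.pyRange 1 floor 1)

-- ===== PRECONDITION & SPEC =====
def Spec_drop_floors (floor : Int) (height : Int) (out : List Int) : Prop := out = drop_floors_alt floor height
instance (floor : Int) (height : Int) (out : List Int) : Decidable (Spec_drop_floors floor height out) := by unfold Spec_drop_floors; infer_instance

-- ===== CLAIM (what is proved, stated in full; the proofs are below) =====
def Claim_equal_drop_floors : Prop := ∀ (floor : Int) (height : Int), Dom_drop_floors floor height → Spec_drop_floors floor height (drop_floors floor height)

-- ===== LEMMAS AND PROOFS =====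

lemma posB_one (floor : Int) : posB floor 1 = floor := by
  unfold posB
  rw [PySem.Int.floordiv_eq_ediv_of_pos (by norm_num)]
  norm_num

lemma posB_succ (floor m : Int) : posB floor (m + 1) = posB floor m + (floor - m) := by
  unfold posB
  rw [PySem.Int.floordiv_eq_ediv_of_pos (by norm_num),
      PySem.Int.floordiv_eq_ediv_of_pos (by norm_num)]
  have h1 : (m + 1) * (m + 1 - 1) = m * (m - 1) + 2 * m := by ring
  have h2 : (m + 1) * floor = m * floor + floor := by ring
  rw [h1, h2]
  generalize m * (m - 1) = a
  generalize m * floor = c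
  omega

lemma pyRange_one_empty (a b : Int) (h : b ≤ a) : PySem.List.pyRange a b 1 = [] := by
  rw [PySem.List.pyRange_one]
  have : (b - a).toNat = 0 := by omega
  simp [this]

lemma dropA_eq_cutB (height floor : Int) :
    ∀ (d : Nat) (m : Int), (floor - m).toNat = d →
      dropA_loop height (posB floor m) (floor - m + 1) =
        cutB floor height (PySem.List.pyRange m floor 1) := by
  intro d
  induction d with
  | zero =>
      intro m hm
      have hle : floor ≤ m := by omega
      rw [pyRange_one_empty m floor hle]
      rw [dropA_loop]
      have : ¬ (posB floor m < height ∧ 1 < floor - m + 1) := by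
        intro ⟨_, h2⟩; omega
      rw [dif_neg this]
      simp [cutB]
  | succ d ih =>
      intro m hm
      have hlt : m < floor := by omega
      rw [PySem.List.pyRange_one_cons hlt]
      rw [dropA_loop]
      by_cases hp : posB floor m < height
      · have hcond : posB floor m < height ∧ 1 < floor - m + 1 := ⟨hp, by omega⟩
        rw [dif_pos hcond]
        have hstep : posB floor m + (floor - m + 1 - 1) = posB floor (m + 1) := by
          rw [posB_succ]; ring
        have hjump : floor - m + 1 - 1 = floor - (m + 1) + 1 := by ring
        rw [hstep, hjump, ih (m + 1) (by omega)]
        simp [cutB, not_le.mpr hp]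
      · have hcond : ¬ (posB floor m < height ∧ 1 < floor - m + 1) := by
          intro ⟨h1, _⟩; exact hp h1
        rw [dif_neg hcond]
        simp [cutB, le_of_not_gt hp]

-- ===== VERDICT (by name: the statement is the Claim_ definition above) =====
theorem drop_floors_spec : Claim_equal_drop_floors := by
  intro floor height _
  unfold Spec_drop_floors drop_floors drop_floors_alt
  have h := dropA_eq_cutB height floor (floor - 1).toNat 1 rfl
  rw [posB_one] at h
  have hj : floor - 1 + 1 = floor := by ring
  rw [hj] at h
  exact h
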